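-- pv_equiv track=rewrite | github.com/MALAIRAJ23/semester3 | DAA/q2.1.py | has_cycle_kruskal
-- ===== SOURCE A (Python) =====
-- def find(parent, u):
--     if parent[u] != u:
--         parent[u] = find(parent, parent[u])
--     return parent[u]
--
-- def union(parent, rank, u, v):
--     root_u = find(parent, u)
--     root_v = find(parent, v)
--
--     if root_u == root_v:
--         return False
--
--
--     if rank[root_u] > rank[root_v]:
--         parent[root_v] = root_u
--     elif rank[root_u] < rank[root_v]:
--         parent[u] = root_v
--     else:
--         parent[root_v] = root_u
--         rank[root_u] += 1
--     return True
--
-- def has_cycle_kruskal(matrix):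
--     n = len(matrix)
--     edges = []
--
--
--     for i in range(n):
--         for j in range(i + 1, n):
--             if matrix[i][j] != 0:
--                 edges.append((i, j, matrix[i][j]))
--
--     edges.sort(key=lambda x: x[2])
--     parent = list(range(n))
--     rank = [0] * n
--     edge_count = 0
--
--     for u, v, _ in edges:
--         if edge_count == n - 1:
--             break
--         if union(parent, rank, u, v):
--             edge_count += 1
--
--     return edge_count < n - 1
-- ===== SOURCE B (Python) =====
-- # NOTE: has_cycle_kruskal's return value is NOT plain graph connectivity: its union()
-- # attaches the queried node u (not u's root) when rank[root_u] < rank[root_v], so the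
-- # answer depends on the exact evolution of the union-find forest (e.g. on the 7x7
-- # matrix with edges (0,1,1),(2,3,2),(4,5,3),(2,4,4),(1,2,5),(0,2,6) and node 6
-- # isolated it returns False although the graph is disconnected).  Any exact
-- # re-implementation must therefore replay the same forest dynamics; B differs in
-- # decomposition: a hand-written stable merge sort instead of list.sort(key=...), a
-- # two-phase iterative find (walk to root, then compress) instead of the recursive one,
-- # a comprehension for the edge scan, and a condition-driven while loop with an explicit
-- # cursor instead of for+break.
--
-- def _merge(a, b):
--     out = []
--     ia = ib = 0
--     while ia < len(a) and ib < len(b):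
--         if b[ib][2] < a[ia][2]:
--             out.append(b[ib]); ib += 1
--         else:
--             out.append(a[ia]); ia += 1
--     return out + a[ia:] + b[ib:]
--
-- def _msort(es):
--     if len(es) < 2:
--         return es
--     mid = len(es) // 2
--     return _merge(_msort(es[:mid]), _msort(es[mid:]))
--
-- def _root(parent, u):
--     path = []
--     while parent[u] != u:
--         path.append(u)
--         u = parent[u]
--     for x in path:
--         parent[x] = u
--     return u
--
-- def has_cycle_kruskal(matrix):
--     n = len(matrix)
--     edges = _msort([(i, j, matrix[i][j])
--                     for i in range(n) for j in range(i + 1, n)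
--                     if matrix[i][j] != 0])
--     parent = list(range(n))
--     rank = [0] * n
--     need = n - 1
--     cnt = 0
--     k = 0
--     while cnt != need and k < len(edges):
--         i, j, _ = edges[k]
--         k += 1
--         ru = _root(parent, i)
--         rv = _root(parent, j)
--         if ru != rv:
--             if rank[ru] < rank[rv]:
--                 parent[i] = rv          # replays A's attach-the-node behaviour
--             elif rank[rv] < rank[ru]:
--                 parent[rv] = ru
--             else:
--                 parent[rv] = ru
--                 rank[ru] += 1
--             cnt += 1
--     return cnt < need
-- ===== Notes on version B (the rewrite author's own statement) =====
-- stated objective: alternative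
-- what changed: A's value depends on its exact union-find forest dynamics (its union attaches the queried node, not its root, when rank[root_u] < rank[root_v], which is observable), so B replays the same process with a different decomposition: a hand-written stable merge sort instead of list.sort(key=...), a two-phase iterative find (walk to root, then compress the collected path) instead of the recursive one, a comprehension edge scan, and a condition-driven while loop with a cursor instead of for+break.
import Mathlib
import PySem

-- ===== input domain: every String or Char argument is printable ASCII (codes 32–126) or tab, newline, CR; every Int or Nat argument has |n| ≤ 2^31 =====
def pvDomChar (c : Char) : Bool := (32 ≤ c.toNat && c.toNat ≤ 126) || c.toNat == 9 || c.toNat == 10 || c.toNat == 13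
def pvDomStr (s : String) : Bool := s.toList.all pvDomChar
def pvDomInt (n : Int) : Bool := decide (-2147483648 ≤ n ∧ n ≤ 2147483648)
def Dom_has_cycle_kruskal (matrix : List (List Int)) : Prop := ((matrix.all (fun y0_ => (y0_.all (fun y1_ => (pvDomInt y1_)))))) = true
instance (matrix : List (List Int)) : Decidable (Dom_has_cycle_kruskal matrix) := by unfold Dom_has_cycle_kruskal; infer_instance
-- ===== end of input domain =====

-- A's return value depends on its exact union-find forest dynamics (its union attaches
-- the queried node, not its root, when rank[root_u] < rank[root_v]), so B replays the
-- same process with a different decomposition: a hand-written stable merge sort instead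
-- of list.sort(key=...), a two-phase iterative find (walk to the root, then compress)
-- instead of the recursive one, a comprehension edge scan and a condition-driven while
-- loop instead of for+break. Objective: alternative structure, not claimed faster.

-- ===== PORT A =====
-- matrix[i][j] (shared accessor; exact for the in-range reads Pre_ admits)
def pvCell (matrix : List (List Int)) (i j : Int) : Int :=
  PySem.List.pyGetD (PySem.List.pyGetD matrix i []) j 0

-- def find(parent, u): recursive, with path compression (fuel n+1 always suffices: the
-- parent forest is acyclic, so Python's recursion depth is below it)
def pvFindA (fuel : Nat) (parent : List Int) (u : Int) : Int × List Int :=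
  match fuel with
  | 0 => (u, parent)
  | f + 1 =>
    if PySem.List.pyGetD parent u u ≠ u then
      let fr := pvFindA f parent (PySem.List.pyGetD parent u u)
      (fr.1, PySem.List.pySetD fr.2 u fr.1)
    else (u, parent)

-- def union(parent, rank, u, v)  (returns (merged?, parent, rank))
def pvUnionA (fuel : Nat) (parent rank : List Int) (u v : Int) : Bool × List Int × List Int :=
  let fu := pvFindA fuel parent u
  let fv := pvFindA fuel fu.2 v
  if fu.1 = fv.1 then (false, fv.2, rank)
  else if PySem.List.pyGetD rank fu.1 0 > PySem.List.pyGetD rank fv.1 0 then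
    (true, PySem.List.pySetD fv.2 fv.1 fu.1, rank)
  else if PySem.List.pyGetD rank fu.1 0 < PySem.List.pyGetD rank fv.1 0 then
    (true, PySem.List.pySetD fv.2 u fv.1, rank)
  else
    (true, PySem.List.pySetD fv.2 fv.1 fu.1,
      PySem.List.pySetD rank fu.1 (PySem.List.pyGetD rank fu.1 0 + 1))

-- the edge-collection double loop
def pvEdgesA (matrix : List (List Int)) (n : Int) : List (Int × Int × Int) :=
  (PySem.List.pyRange 0 n 1).foldl (fun acc i =>
    (PySem.List.pyRange (i + 1) n 1).foldl (fun acc2 j =>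
      if pvCell matrix i j ≠ 0 then acc2 ++ [(i, j, pvCell matrix i j)] else acc2) acc) []

-- the main loop with its break (state = (parent, rank, edge_count))
def pvLoopA (n : Int) (fuel : Nat) (edges : List (Int × Int × Int))
    (s : List Int × List Int × Int) : List Int × List Int × Int :=
  match edges with
  | [] => s
  | e :: rest =>
    if s.2.2 = n - 1 then s
    else
      let r := pvUnionA fuel s.1 s.2.1 e.1 e.2.1
      pvLoopA n fuel rest (r.2.1, r.2.2, if r.1 then s.2.2 + 1 else s.2.2)

def has_cycle_kruskal (matrix : List (List Int)) : Bool :=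
  let n : Int := matrix.length
  let edges := PySem.List.sorted (pvEdgesA matrix n) (fun e => e.2.2) false
  let s := pvLoopA n (n.toNat + 1) edges
      (PySem.List.pyRange 0 n 1, List.replicate n.toNat 0, 0)
  decide (s.2.2 < n - 1)

-- ===== PORT B =====
-- def _merge(a, b): two-cursor merge, strictly-smaller b element first (stable)
def pvMergeB : List (Int × Int × Int) → List (Int × Int × Int) → List (Int × Int × Int)
  | a, [] => a
  | [], b => b
  | x :: a, y :: b =>
    if y.2.2 < x.2.2 then y :: pvMergeB (x :: a) b else x :: pvMergeB a (y :: b)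
termination_by a b => a.length + b.length

-- def _msort(es): split at len//2 (es[:mid] / es[mid:] with 0 ≤ mid = take/drop), recurse, merge
def pvMsortB (es : List (Int × Int × Int)) : List (Int × Int × Int) :=
  if es.length < 2 then es
  else pvMergeB (pvMsortB (es.take (es.length / 2))) (pvMsortB (es.drop (es.length / 2)))
termination_by es.length
decreasing_by
  · simp only [List.length_take]; omega
  · simp only [List.length_drop]; omega

-- the edge comprehension [(i, j, matrix[i][j]) for i … for j … if matrix[i][j] != 0]
def pvEdgesB (matrix : List (List Int)) (n : Int) : List (Int × Int × Int) :=
  (PySem.List.pyRange 0 n 1).flatMap (fun i =>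
    ((PySem.List.pyRange (i + 1) n 1).filter (fun j => decide (pvCell matrix i j ≠ 0))).map
      (fun j => (i, j, pvCell matrix i j)))

-- def _root(parent, u): phase 1, walk to the root collecting the path …
def pvRootGo (fuel : Nat) (parent : List Int) (u : Int) : Int × List Int :=
  match fuel with
  | 0 => (u, [])
  | f + 1 =>
    if PySem.List.pyGetD parent u u = u then (u, [])
    else
      let r := pvRootGo f parent (PySem.List.pyGetD parent u u)
      (r.1, u :: r.2)

-- … phase 2, point every path node at the root
def pvRootB (fuel : Nat) (parent : List Int) (u : Int) : Int × List Int :=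
  let g := pvRootGo fuel parent u
  (g.1, g.2.foldl (fun q x => PySem.List.pySetD q x g.1) parent)

-- one iteration of the while-loop body (state = (parent, rank, cnt))
def pvStepB (fuel : Nat) (s : List Int × List Int × Int) (i j : Int) :
    List Int × List Int × Int :=
  let fu := pvRootB fuel s.1 i
  let fv := pvRootB fuel fu.2 j
  if fu.1 ≠ fv.1 then
    if PySem.List.pyGetD s.2.1 fu.1 0 < PySem.List.pyGetD s.2.1 fv.1 0 then
      (PySem.List.pySetD fv.2 i fv.1, s.2.1, s.2.2 + 1)
    else if PySem.List.pyGetD s.2.1 fv.1 0 < PySem.List.pyGetD s.2.1 fu.1 0 then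
      (PySem.List.pySetD fv.2 fv.1 fu.1, s.2.1, s.2.2 + 1)
    else
      (PySem.List.pySetD fv.2 fv.1 fu.1,
       PySem.List.pySetD s.2.1 fu.1 (PySem.List.pyGetD s.2.1 fu.1 0 + 1), s.2.2 + 1)
  else (fv.2, s.2.1, s.2.2)

-- while cnt != need and k < len(edges): … (cursor over the remaining edges)
def pvWhileB (need : Int) (fuel : Nat) (edges : List (Int × Int × Int))
    (s : List Int × List Int × Int) : List Int × List Int × Int :=
  match edges with
  | [] => s
  | e :: rest =>
    if s.2.2 = need then s
    else pvWhileB need fuel rest (pvStepB fuel s e.1 e.2.1)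

def has_cycle_kruskal_alt (matrix : List (List Int)) : Bool :=
  let n : Int := matrix.length
  let edges := pvMsortB (pvEdgesB matrix n)
  let s := pvWhileB (n - 1) (n.toNat + 1) edges
      (PySem.List.pyRange 0 n 1, List.replicate n.toNat 0, 0)
  decide (s.2.2 < n - 1)

-- ===== PRECONDITION & SPEC =====
-- Pre_ excludes exactly the ragged matrices on which A raises IndexError: every row read
-- by the scans (all but the last) must have at least len(matrix) entries.
def Pre_has_cycle_kruskal (matrix : List (List Int)) : Prop :=
  ∀ r ∈ matrix.take (matrix.length - 1), matrix.length ≤ r.length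
instance (matrix : List (List Int)) : Decidable (Pre_has_cycle_kruskal matrix) := by
  unfold Pre_has_cycle_kruskal; infer_instance
def pvWitness_has_cycle_kruskal : List (List Int) := [[0, 1], [7]]

def Spec_has_cycle_kruskal (matrix : List (List Int)) (out : Bool) : Prop := out = has_cycle_kruskal_alt matrix
instance (matrix : List (List Int)) (out : Bool) : Decidable (Spec_has_cycle_kruskal matrix out) := by unfold Spec_has_cycle_kruskal; infer_instance

-- ===== CLAIM (what is proved, stated in full; the proofs are below) =====
def Claim_equal_has_cycle_kruskal : Prop := ∀ (matrix : List (List Int)), Dom_has_cycle_kruskal matrix → Pre_has_cycle_kruskal matrix → Spec_has_cycle_kruskal matrix (has_cycle_kruskal matrix)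

-- ===== LEMMAS AND PROOFS =====

-- ---- Part I: the two edge lists are the same list ----

def pvPairs (n : Int) : List (Int × Int) :=
  (PySem.List.pyRange 0 n 1).flatMap (fun i => (PySem.List.pyRange (i + 1) n 1).map (fun j => (i, j)))

lemma nested_fold_eq {σ : Type} (n : Int) (g : σ → Int × Int → σ) (init : σ) :
    (PySem.List.pyRange 0 n 1).foldl (fun a i =>
      (PySem.List.pyRange (i + 1) n 1).foldl (fun b j => g b (i, j)) a) init
    = (pvPairs n).foldl g init := by
  rw [pvPairs, List.foldl_flatMap]
  simp [List.foldl_map]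

-- A's collected edges, as filter + map over the pair scan
lemma edgesA_eq (matrix : List (List Int)) (n : Int) :
    pvEdgesA matrix n
    = (((pvPairs n).filter (fun q => decide (pvCell matrix q.1 q.2 ≠ 0))).map
        (fun q => (q.1, q.2, pvCell matrix q.1 q.2))) := by
  rw [pvEdgesA, nested_fold_eq n
    (fun acc q => if pvCell matrix q.1 q.2 ≠ 0 then acc ++ [(q.1, q.2, pvCell matrix q.1 q.2)] else acc) []]
  have h := PySem.List.foldl_append_if (fun q : Int × Int => decide (pvCell matrix q.1 q.2 ≠ 0))
    (fun q => (q.1, q.2, pvCell matrix q.1 q.2)) (pvPairs n) []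
  simpa using h

lemma flatMap_filter_map {α β γ : Type} (l : List α) (g : α → List β) (P : β → Bool) (F : β → γ) :
    ((l.flatMap g).filter P).map F = l.flatMap (fun a => (((g a).filter P).map F)) := by
  induction l with
  | nil => rfl
  | cons a t ih => simp [List.flatMap_cons, List.filter_append, List.map_append, ih]

lemma edges_agree (matrix : List (List Int)) (n : Int) :
    pvEdgesA matrix n = pvEdgesB matrix n := by
  rw [edgesA_eq, pvEdgesB, pvPairs, flatMap_filter_map]
  refine List.flatMap_congr (fun i _ => ?_)
  rw [List.filter_map, List.map_map]
  rfl

-- ---- Part II: the hand merge sort is the stable sort by weight ----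

-- membership in a merge
lemma mem_mergeB (z : Int × Int × Int) :
    ∀ (a b : List (Int × Int × Int)), z ∈ pvMergeB a b ↔ z ∈ a ∨ z ∈ b := by
  intro a b
  induction a, b using pvMergeB.induct with
  | case1 a => simp [pvMergeB]
  | case2 b => simp [pvMergeB]
  | case3 x a y b h ih =>
    rw [pvMergeB, if_pos h]
    simp only [List.mem_cons, ih]
    tauto
  | case4 x a y b h ih =>
    rw [pvMergeB, if_neg h]
    simp only [List.mem_cons, ih]
    tauto

-- merging two runs keeps the keys nondecreasing
lemma mergeB_pairwise :
    ∀ (a b : List (Int × Int × Int)),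
      a.Pairwise (fun e f => e.2.2 ≤ f.2.2) → b.Pairwise (fun e f => e.2.2 ≤ f.2.2) →
      (pvMergeB a b).Pairwise (fun e f => e.2.2 ≤ f.2.2) := by
  intro a b
  induction a, b using pvMergeB.induct with
  | case1 a => intro ha _; simpa [pvMergeB] using ha
  | case2 b => intro _ hb; simpa [pvMergeB] using hb
  | case3 x a y b h ih =>
    intro ha hb
    rw [List.pairwise_cons] at hb
    rw [pvMergeB, if_pos h, List.pairwise_cons]
    refine ⟨?_, ih ha hb.2⟩
    intro z hz
    rcases (mem_mergeB z (x :: a) b).mp hz with hz1 | hz2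
    · rcases List.mem_cons.mp hz1 with rfl | hz1'
      · exact le_of_lt h
      · exact le_trans (le_of_lt h) ((List.pairwise_cons.mp ha).1 z hz1')
    · exact hb.1 z hz2
  | case4 x a y b h ih =>
    intro ha hb
    rw [List.pairwise_cons] at ha
    rw [pvMergeB, if_neg h, List.pairwise_cons]
    refine ⟨?_, ih ha.2 hb⟩
    intro z hz
    rcases (mem_mergeB z a (y :: b)).mp hz with hz1 | hz2
    · exact ha.1 z hz1
    · rcases List.mem_cons.mp hz2 with rfl | hz2'
      · omega
      · exact le_trans (by omega) ((List.pairwise_cons.mp hb).1 z hz2')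

-- stability of the merge, expressed through per-weight filters
lemma mergeB_filter (w : Int) :
    ∀ (a b : List (Int × Int × Int)), a.Pairwise (fun e f => e.2.2 ≤ f.2.2) →
      (pvMergeB a b).filter (fun e => decide (e.2.2 = w))
      = a.filter (fun e => decide (e.2.2 = w)) ++ b.filter (fun e => decide (e.2.2 = w)) := by
  intro a b
  induction a, b using pvMergeB.induct with
  | case1 a => intro _; simp [pvMergeB]
  | case2 b => intro _; simp [pvMergeB]
  | case3 x a y b h ih =>
    intro ha
    rw [pvMergeB, if_pos h]
    by_cases hw : y.2.2 = w
    · have hnil : (x :: a).filter (fun e => decide (e.2.2 = w)) = [] := by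
        rw [List.filter_eq_nil_iff]
        intro z hz
        rcases List.mem_cons.mp hz with rfl | hz'
        · simp; omega
        · have := (List.pairwise_cons.mp ha).1 z hz'
          simp; omega
      rw [List.filter_cons_of_pos (by simpa using hw), ih ha, hnil,
        List.filter_cons_of_pos (by simpa using hw)]
      simp
    · rw [List.filter_cons_of_neg (by simpa using hw), ih ha,
        show (y :: b).filter (fun e => decide (e.2.2 = w)) = b.filter (fun e => decide (e.2.2 = w))
          from List.filter_cons_of_neg (by simpa using hw)]
  | case4 x a y b h ih =>
    intro ha
    rw [List.pairwise_cons] at ha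
    rw [pvMergeB, if_neg h, List.filter_cons, List.filter_cons]
    by_cases hw : x.2.2 = w
    · simp [hw, ih ha.2]
    · simp [hw, ih ha.2]

-- the merge sort: keys nondecreasing …
lemma msortB_pairwise (es : List (Int × Int × Int)) :
    (pvMsortB es).Pairwise (fun e f => e.2.2 ≤ f.2.2) := by
  induction es using pvMsortB.induct with
  | case1 es h =>
    rw [pvMsortB, if_pos h]
    match es, h with
    | [], _ => exact List.Pairwise.nil
    | [x], _ => exact List.pairwise_singleton _ x
  | case2 es h ih1 ih2 =>
    rw [pvMsortB, if_neg h]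
    exact mergeB_pairwise _ _ ih1 ih2

-- … and stable (per-weight filters untouched)
lemma msortB_filter (es : List (Int × Int × Int)) (w : Int) :
    (pvMsortB es).filter (fun e => decide (e.2.2 = w)) = es.filter (fun e => decide (e.2.2 = w)) := by
  induction es using pvMsortB.induct with
  | case1 es h => rw [pvMsortB, if_pos h]
  | case2 es h ih1 ih2 =>
    rw [pvMsortB, if_neg h, mergeB_filter w _ _ (msortB_pairwise _), ih1, ih2,
      ← List.filter_append, List.take_append_drop]

-- stability of PySem's insertion-based sort, via its insert step
lemma insertBy_filter (e : Int × Int × Int) (w : Int) :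
    ∀ (l : List (Int × Int × Int)), l.Pairwise (fun a b => a.2.2 ≤ b.2.2) →
      (PySem.List.insertBy (fun a b => decide (a.2.2 < b.2.2)) e l).filter
          (fun z => decide (z.2.2 = w))
      = l.filter (fun z => decide (z.2.2 = w)) ++ (if e.2.2 = w then [e] else []) := by
  intro l
  induction l with
  | nil =>
    intro _
    simp only [PySem.List.insertBy, List.filter_nil, List.nil_append, List.filter_cons]
    by_cases h : e.2.2 = w <;> simp [h]
  | cons y ys ih =>
    intro hl
    rw [List.pairwise_cons] at hl
    rw [PySem.List.insertBy]
    by_cases h : e.2.2 < y.2.2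
    · simp only [decide_eq_true_eq.mpr h, if_pos]
      by_cases hw : e.2.2 = w
      · have hnil : (y :: ys).filter (fun z => decide (z.2.2 = w)) = [] := by
          rw [List.filter_eq_nil_iff]
          intro z hz
          rcases List.mem_cons.mp hz with rfl | hz'
          · simp; omega
          · have := hl.1 z hz'
            simp; omega
        rw [List.filter_cons_of_pos (by simpa using hw), hnil]
        simp [hw]
      · rw [List.filter_cons_of_neg (by simpa using hw)]
        simp [hw]
    · simp only [decide_eq_true_eq, h, if_false]
      rw [List.filter_cons, List.filter_cons]
      by_cases hw : y.2.2 = w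
      · simp [hw, ih hl.2]
      · simp [hw, ih hl.2]

lemma sorted_filter (w : Int) :
    ∀ (xs : List (Int × Int × Int)),
      (PySem.List.sorted xs (fun e => e.2.2) false).filter (fun z => decide (z.2.2 = w))
      = xs.filter (fun z => decide (z.2.2 = w)) := by
  intro xs
  induction xs using List.reverseRecOn with
  | nil => simp [PySem.List.sorted]
  | append_singleton xs e ih =>
    rw [PySem.List.sorted_eq_foldl_insertBy, List.foldl_append, List.foldl_cons, List.foldl_nil,
      ← PySem.List.sorted_eq_foldl_insertBy]
    rw [insertBy_filter e w _ (PySem.List.sorted_pairwise xs _), ih, List.filter_append,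
      List.filter_cons, List.filter_nil]
    by_cases h : e.2.2 = w <;> simp [h]

-- a stable sort is unique: nondecreasing keys + identical per-weight filters force equality
lemma stable_unique :
    ∀ (l₁ l₂ : List (Int × Int × Int)),
      l₁.Pairwise (fun a b => a.2.2 ≤ b.2.2) → l₂.Pairwise (fun a b => a.2.2 ≤ b.2.2) →
      (∀ w, l₁.filter (fun z => decide (z.2.2 = w)) = l₂.filter (fun z => decide (z.2.2 = w))) →
      l₁ = l₂ := by
  intro l₁
  induction l₁ with
  | nil =>
    intro l₂ _ _ h
    cases l₂ with
    | nil => rfl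
    | cons y t' =>
      have := h y.2.2
      rw [List.filter_nil, List.filter_cons_of_pos (by simp)] at this
      exact absurd this.symm (List.cons_ne_nil _ _)
  | cons x t ih =>
    intro l₂ h₁ h₂ h
    cases l₂ with
    | nil =>
      have := h x.2.2
      rw [List.filter_nil, List.filter_cons_of_pos (by simp)] at this
      exact absurd this (List.cons_ne_nil _ _)
    | cons y t' =>
      rw [List.pairwise_cons] at h₁ h₂
      have hxy : x = y := by
        by_cases hk : y.2.2 = x.2.2
        · have hx := h x.2.2
          rw [List.filter_cons_of_pos (by simp), List.filter_cons_of_pos (by simp [hk])] at hx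
          exact (List.cons_eq_cons.mp hx).1
        · -- keys differ: each head occurs in the other's tail, contradicting sortedness
          have hx := h x.2.2
          rw [List.filter_cons_of_pos (by simp), List.filter_cons_of_neg (by simpa using hk)] at hx
          have hxmem : x ∈ t'.filter (fun z => decide (z.2.2 = x.2.2)) := by
            rw [← hx]; exact List.mem_cons_self
          have hxt' : y.2.2 ≤ x.2.2 := h₂.1 x (List.mem_of_mem_filter hxmem)
          have hy := h y.2.2
          rw [List.filter_cons_of_neg (by simp only [decide_eq_true_eq]; omega),
            List.filter_cons_of_pos (by simp)] at hy
          have hymem : y ∈ t.filter (fun z => decide (z.2.2 = y.2.2)) := by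
            rw [hy]; exact List.mem_cons_self
          have hyt : x.2.2 ≤ y.2.2 := h₁.1 y (List.mem_of_mem_filter hymem)
          omega
      subst hxy
      have htails : ∀ w, t.filter (fun z => decide (z.2.2 = w)) = t'.filter (fun z => decide (z.2.2 = w)) := by
        intro w
        have hw := h w
        by_cases hxw : x.2.2 = w
        · rw [List.filter_cons_of_pos (by simpa using hxw),
            List.filter_cons_of_pos (by simpa using hxw)] at hw
          exact (List.cons.injEq _ _ _ _ ▸ hw).2
        · rwa [List.filter_cons_of_neg (by simpa using hxw),
            List.filter_cons_of_neg (by simpa using hxw)] at hw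
      exact congrArg (x :: ·) (ih t' h₁.2 h₂.2 htails)

lemma msort_eq_sorted (es : List (Int × Int × Int)) :
    pvMsortB es = PySem.List.sorted es (fun e => e.2.2) false :=
  stable_unique _ _ (msortB_pairwise es) (PySem.List.sorted_pairwise es _)
    (fun w => (msortB_filter es w).trans (sorted_filter w es).symm)

-- ---- Part III: the two finds agree on every state ----

-- writing the same value twice commutes, at any pair of Python indices
lemma setD_comm (q : List Int) (a b r : Int) :
    PySem.List.pySetD (PySem.List.pySetD q a r) b r
    = PySem.List.pySetD (PySem.List.pySetD q b r) a r := by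
  simp only [PySem.List.pySetD, PySem.List.pySet?]
  cases ha : PySem.List.pyIdx? q.length a with
  | none =>
    cases hb : PySem.List.pyIdx? q.length b with
    | none => simp [ha, hb]
    | some kb => simp [ha, hb, List.length_set]
  | some ka =>
    cases hb : PySem.List.pyIdx? q.length b with
    | none => simp [ha, hb, List.length_set]
    | some kb =>
      simp only [ha, hb, Option.map_some, Option.getD_some, List.length_set]
      by_cases hk : ka = kb
      · subst hk; rfl
      · exact List.set_comm r r hk

-- a pending write can be pushed through the compression fold
lemma foldl_setD_push (r : Int) :
    ∀ (l : List Int) (p : List Int) (u : Int),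
      PySem.List.pySetD (l.foldl (fun q x => PySem.List.pySetD q x r) p) u r
      = l.foldl (fun q x => PySem.List.pySetD q x r) (PySem.List.pySetD p u r) := by
  intro l
  induction l with
  | nil => intro p u; rfl
  | cons a t ih =>
    intro p u
    rw [List.foldl_cons, List.foldl_cons, ih, setD_comm]

lemma find_agree (fuel : Nat) :
    ∀ (p : List Int) (u : Int), pvFindA fuel p u = pvRootB fuel p u := by
  induction fuel with
  | zero => intro p u; rfl
  | succ f ih =>
    intro p u
    rw [pvFindA, pvRootB, pvRootGo]
    by_cases h : PySem.List.pyGetD p u u = u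
    · simp [h]
    · simp only [h, ne_eq, not_false_iff, if_pos, if_neg]
      rw [ih]
      simp only [pvRootB, List.foldl_cons]
      rw [foldl_setD_push]

-- ---- Part IV: the loops agree step for step ----

lemma step_agree (fuel : Nat) (s : List Int × List Int × Int) (i j : Int) :
    (let r := pvUnionA fuel s.1 s.2.1 i j
     (r.2.1, r.2.2, if r.1 then s.2.2 + 1 else s.2.2))
    = pvStepB fuel s i j := by
  simp only [pvUnionA, pvStepB, find_agree]
  by_cases hr : (pvRootB fuel s.1 i).1 = (pvRootB fuel (pvRootB fuel s.1 i).2 j).1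
  · simp [hr]
  · rcases lt_trichotomy (PySem.List.pyGetD s.2.1 (pvRootB fuel s.1 i).1 0)
      (PySem.List.pyGetD s.2.1 (pvRootB fuel (pvRootB fuel s.1 i).2 j).1 0) with h | h | h
    · simp [hr, h, lt_asymm h]
    · simp [hr, h]
    · simp [hr, h, not_lt.mpr h.le]

lemma loop_agree (n : Int) (fuel : Nat) :
    ∀ (l : List (Int × Int × Int)) (s : List Int × List Int × Int),
      pvLoopA n fuel l s = pvWhileB (n - 1) fuel l s := by
  intro l
  induction l with
  | nil => intro s; rfl
  | cons e t ih =>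
    intro s
    rw [pvLoopA, pvWhileB]
    by_cases h : s.2.2 = n - 1
    · rw [if_pos h, if_pos h]
    · rw [if_neg h, if_neg h, ih, step_agree]

-- ===== VERDICT =====
theorem has_cycle_kruskal_spec : Claim_equal_has_cycle_kruskal := by
  intro matrix _ _
  unfold Spec_has_cycle_kruskal has_cycle_kruskal has_cycle_kruskal_alt
  simp only [edges_agree, ← msort_eq_sorted, loop_agree]
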